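-- pv_equiv track=rewrite | github.com/CZboop/Challenges-and-Interview-Question-Practice | codewars/python/Make A Window.py | make_a_window
-- ===== SOURCE A (Python) =====
-- def make_a_window(num):
--     layer = "|{}|{}|\n".format("."*num,"."*num)
--     top = "{}\n".format("-"*(len(layer)-1))
--     mid = "|{}+{}|\n".format("-"*num,"-"*num)
--     window = [top]
--     for i in range(num):
--         window.append(layer)
--     window.append(mid)
--     for i in range(num):
--         window.append(layer)
--     window.append(top)
--     return "".join(window).strip("\n")
-- ===== SOURCE B (Python) =====
-- def make_a_window(num):
--     n = max(num, 0)
--     s = 2 * n + 3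
--     def cell(r, c):
--         if r == 0 or r == s - 1:
--             return '-'
--         if c == 0 or c == s - 1:
--             return '|'
--         if r == n + 1 and c == n + 1:
--             return '+'
--         if r == n + 1:
--             return '-'
--         if c == n + 1:
--             return '|'
--         return '.'
--     border = ''.join(cell(0, c) for c in range(s))
--     inner = ''.join(cell(1, c) for c in range(s))
--     centre = ''.join(cell(n + 1, c) for c in range(s))
--     rows = [border] + [inner] * n + [centre] + [inner] * n + [border]
--     return '\n'.join(rows)
-- ===== Notes on version B (the rewrite author's own statement) =====
-- stated objective: alternative
-- what changed: B builds the window character by character from (row, column) coordinates over a (2n+3)-square grid and joins the rows with newlines, instead of A's concatenation of preformatted line strings followed by a trailing-newline strip.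
import Mathlib
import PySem

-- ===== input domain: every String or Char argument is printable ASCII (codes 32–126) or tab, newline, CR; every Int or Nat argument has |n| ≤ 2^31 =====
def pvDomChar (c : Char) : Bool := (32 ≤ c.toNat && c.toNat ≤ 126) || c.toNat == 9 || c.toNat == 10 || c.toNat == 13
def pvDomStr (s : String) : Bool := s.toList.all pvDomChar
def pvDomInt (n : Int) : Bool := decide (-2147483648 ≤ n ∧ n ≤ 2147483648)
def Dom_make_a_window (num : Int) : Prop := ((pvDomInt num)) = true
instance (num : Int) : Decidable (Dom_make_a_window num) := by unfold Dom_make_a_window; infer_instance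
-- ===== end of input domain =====

-- B builds the window character by character from (row, column) coordinates on a (2n+3)-square
-- grid and joins the rows with newlines, instead of A's concatenation of preformatted line
-- strings followed by a trailing-newline strip; objective: alternative (not claimed faster).

-- ===== PORT A =====
def make_a_window (num : Int) : String :=
  let layer : List Char :=
    ['|'] ++ PySem.List.pyRepeat ['.'] num ++ ['|'] ++ PySem.List.pyRepeat ['.'] num ++ ['|', '\n']
  let top : List Char := PySem.List.pyRepeat ['-'] ((layer.length : Int) - 1) ++ ['\n']
  let mid : List Char :=
    ['|'] ++ PySem.List.pyRepeat ['-'] num ++ ['+'] ++ PySem.List.pyRepeat ['-'] num ++ ['|', '\n']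
  let window : List (List Char) := [top]
  let window := (PySem.List.pyRange 0 num 1).foldl (fun acc _ => acc ++ [layer]) window
  let window := window ++ [mid]
  let window := (PySem.List.pyRange 0 num 1).foldl (fun acc _ => acc ++ [layer]) window
  let window := window ++ [top]
  String.mk (PySem.Chars.stripChars (PySem.Chars.join [] window) ['\n'])

-- ===== PORT B =====
-- helper: the per-cell character chooser (Python's local `cell(r, c)`, closed over n and s)
def pvCellB (n s r c : Int) : Char :=
  if r = 0 ∨ r = s - 1 then '-'
  else if c = 0 ∨ c = s - 1 then '|'
  else if r = n + 1 ∧ c = n + 1 then '+'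
  else if r = n + 1 then '-'
  else if c = n + 1 then '|'
  else '.'

def make_a_window_alt (num : Int) : String :=
  let n : Int := max num 0
  let s : Int := 2 * n + 3
  let border : List Char := (PySem.List.pyRange 0 s 1).map (fun c => pvCellB n s 0 c)
  let inner : List Char := (PySem.List.pyRange 0 s 1).map (fun c => pvCellB n s 1 c)
  let centre : List Char := (PySem.List.pyRange 0 s 1).map (fun c => pvCellB n s (n + 1) c)
  let rows : List (List Char) :=
    [border] ++ PySem.List.pyRepeat [inner] n ++ [centre] ++ PySem.List.pyRepeat [inner] n ++ [border]
  String.mk (PySem.Chars.join ['\n'] rows)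

-- ===== PRECONDITION & SPEC =====
def Spec_make_a_window (num : Int) (out : String) : Prop := out = make_a_window_alt num
instance (num : Int) (out : String) : Decidable (Spec_make_a_window num out) := by unfold Spec_make_a_window; infer_instance

-- ===== CLAIM (what is proved, stated in full; the proofs are below) =====
def Claim_equal_make_a_window : Prop := ∀ (num : Int), Dom_make_a_window num → Spec_make_a_window num (make_a_window num)

-- ===== LEMMAS AND PROOFS =====
def pvFrame {α : Type} (e f c : α) (m : Nat) : List α :=
  e :: (List.replicate m f ++ c :: (List.replicate m f ++ [e]))
def pvDash (m : Nat) : List Char := List.replicate (2 * m + 3) '-'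
def pvDot (m : Nat) : List Char := pvFrame '|' '.' '|' m
def pvMid (m : Nat) : List Char := pvFrame '|' '-' '+' m

theorem pvJoinConsNeNil (sep p : List Char) (l : List (List Char)) (h : l ≠ []) :
    PySem.Chars.join sep (p :: l) = p ++ sep ++ PySem.Chars.join sep l := by
  cases l with
  | nil => exact absurd rfl h
  | cons q rest => exact PySem.Chars.join_cons_cons sep p q rest

theorem pvJoinNilSep (parts : List (List Char)) :
    PySem.Chars.join [] parts = parts.flatten := by
  induction parts with
  | nil => simp [PySem.Chars.join_nil]
  | cons p rest ih =>
    cases rest with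
    | nil => simp [PySem.Chars.join_singleton]
    | cons q r2 =>
      rw [pvJoinConsNeNil _ _ _ (by simp), ih]
      simp

theorem pv_hA (num : Int) (m : Nat) (hm : m = num.toNat)
    (hrange : PySem.List.pyRange 0 num 1 = List.map (fun (k : Nat) => (k : Int)) (List.range m)) :
    make_a_window num = String.mk (PySem.Chars.stripChars
      ((pvDash m ++ ['\n']) ++ ((List.replicate m (pvDot m ++ ['\n'])).flatten ++
        ((pvMid m ++ ['\n']) ++ ((List.replicate m (pvDot m ++ ['\n'])).flatten ++
          (pvDash m ++ ['\n']))))) ['\n']) := by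
  simp only [make_a_window, PySem.List.pyRepeat_singleton, hrange, ← hm,
    PySem.List.foldl_append_singleton_eq_map]
  rw [show ((((['|'] ++ List.replicate m '.' ++ ['|'] ++ List.replicate m '.' ++ ['|', '\n']).length : Int)) - 1).toNat = 2*m+3 from by simp; omega]
  simp only [List.map_const', List.length_map, pvJoinNilSep]
  simp [pvDash, pvDot, pvMid, pvFrame, List.append_assoc]

theorem pvMapRange_const {α : Type} (n : Nat) (g : Nat → α) (a : α)
    (h : ∀ i, i < n → g i = a) : (List.range n).map g = List.replicate n a := by
  rw [List.map_congr_left (g := fun _ => a) (fun x hx => h x (List.mem_range.mp hx))]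
  simp

theorem pvMapRange_frame {α : Type} (m : Nat) (g : Nat → α) (e f c : α)
    (h0 : g 0 = e) (he : g (2 * m + 2) = e) (hc : g (m + 1) = c)
    (hf1 : ∀ i, 1 ≤ i → i ≤ m → g i = f)
    (hf2 : ∀ i, m + 2 ≤ i → i ≤ 2 * m + 1 → g i = f) :
    (List.range (2 * m + 3)).map g = pvFrame e f c m := by
  apply List.ext_getElem
  · simp [pvFrame]; omega
  · intro i h1 h2
    simp only [List.getElem_map, List.getElem_range]
    simp only [pvFrame, List.getElem_cons, List.getElem_append, List.getElem_replicate,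
      List.length_replicate]
    have hi : i < 2 * m + 3 := by simpa using h1
    split_ifs with a1 a2 a3 a4 a5 <;>
      first
      | (subst a1; exact h0)
      | (exact hf1 i (by omega) (by omega))
      | (rw [show i = m + 1 from by omega]; exact hc)
      | (exact hf2 i (by omega) (by omega))
      | (rw [show i = 2 * m + 2 from by omega]; exact he)
      | omega

theorem pv_border (m : Nat) :
    (List.range (2*m+3)).map (fun k : Nat => pvCellB (m : Int) ((2*m+3 : Nat) : Int) 0 (k : Int)) =
      pvDash m := by
  apply pvMapRange_const
  intro j hj
  simp only [pvCellB]
  push_cast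
  split_ifs <;> first | rfl | (exfalso; omega) | (exfalso; simp_all)

theorem pv_centre (m : Nat) :
    (List.range (2*m+3)).map (fun k : Nat => pvCellB (m : Int) ((2*m+3 : Nat) : Int) ((m : Int) + 1) (k : Int)) =
      pvMid m := by
  rw [pvMid]
  apply pvMapRange_frame <;>
    first
    | (intro j hj1 hj2
       simp only [pvCellB]
       push_cast
       split_ifs <;> first | rfl | (exfalso; omega))
    | (simp only [pvCellB]
       push_cast
       split_ifs <;> first | rfl | (exfalso; omega) | (exfalso; simp_all))

theorem pv_inner (m : Nat) (hm : 1 ≤ m) :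
    (List.range (2*m+3)).map (fun k : Nat => pvCellB (m : Int) ((2*m+3 : Nat) : Int) 1 (k : Int)) =
      pvDot m := by
  rw [pvDot]
  apply pvMapRange_frame <;>
    first
    | (intro j hj1 hj2
       simp only [pvCellB]
       push_cast
       split_ifs <;> first | rfl | (exfalso; omega) | (exfalso; simp_all; done) | (exfalso; simp_all; omega))
    | (simp only [pvCellB]
       push_cast
       split_ifs <;> first | rfl | (exfalso; omega) | (exfalso; simp_all; done) | (exfalso; simp_all; omega))

theorem pv_hB (num : Int) (m : Nat) (hmax : max num 0 = (m : Int)) :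
    make_a_window_alt num = String.mk (PySem.Chars.join ['\n']
      (pvFrame (pvDash m) (pvDot m) (pvMid m) m)) := by
  have hs : (2 : Int) * ((m : Int)) + 3 = ((2 * m + 3 : Nat) : Int) := by push_cast; ring
  simp only [make_a_window_alt, hmax, hs, PySem.List.pyRange_zero_natCast,
    PySem.List.pyRepeat_singleton, Int.toNat_natCast, List.map_map, Function.comp_def]
  rw [pv_border m, pv_centre m]
  rcases m with _ | k
  · simp [pvFrame]
  · rw [pv_inner (k+1) (by omega)]
    simp [pvFrame, List.append_assoc]

theorem pvJoinRepl (k : Nat) (f c : List Char) (rest : List (List Char)) :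
    PySem.Chars.join ['\n'] (List.replicate k f ++ c :: rest) =
      (List.replicate k (f ++ ['\n'])).flatten ++ PySem.Chars.join ['\n'] (c :: rest) := by
  induction k with
  | zero => simp
  | succ k ih =>
    rw [List.replicate_succ, List.cons_append,
      pvJoinConsNeNil _ _ _ (by simp), ih, List.replicate_succ]
    simp [List.append_assoc]

theorem pvStrip (a : Char) (zs : List Char) (ha : a ≠ '\n')
    (hl : ∀ x, (a :: zs).getLast? = some x → x ≠ '\n') :
    PySem.Chars.stripChars ((a :: zs) ++ ['\n']) ['\n'] = a :: zs := by
  simp only [PySem.Chars.stripChars, List.cons_append]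
  rw [List.dropWhile_cons_of_neg (by simp [ha])]
  rw [show (a :: (zs ++ ['\n'])).reverse = '\n' :: (zs.reverse ++ [a]) by simp]
  rw [List.dropWhile_cons_of_pos (by simp)]
  have : List.dropWhile (fun c => ['\n'].contains c) (zs.reverse ++ [a]) = zs.reverse ++ [a] := by
    cases hzr : zs.reverse with
    | nil => simp [ha]
    | cons b ws =>
      have hb : b ≠ '\n' := by
        apply hl
        rw [← List.head?_reverse]
        simp [hzr]
      rw [List.cons_append, List.dropWhile_cons_of_neg (by simp [hb])]
  rw [this]
  simp

theorem pv_final (m : Nat) :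
    PySem.Chars.stripChars ((pvDash m ++ ['\n']) ++ ((List.replicate m (pvDot m ++ ['\n'])).flatten ++
        ((pvMid m ++ ['\n']) ++ ((List.replicate m (pvDot m ++ ['\n'])).flatten ++
          (pvDash m ++ ['\n']))))) ['\n'] =
      PySem.Chars.join ['\n'] (pvFrame (pvDash m) (pvDot m) (pvMid m) m) := by
  have hdash : pvDash m = '-' :: List.replicate (2*m+2) '-' := by
    rw [pvDash, show 2*m+3 = (2*m+2)+1 from by omega, List.replicate_succ]
  have hL : (pvDash m ++ ['\n']) ++ ((List.replicate m (pvDot m ++ ['\n'])).flatten ++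
        ((pvMid m ++ ['\n']) ++ ((List.replicate m (pvDot m ++ ['\n'])).flatten ++
          (pvDash m ++ ['\n'])))) =
      ('-' :: (List.replicate (2*m+2) '-' ++ (['\n'] ++ ((List.replicate m (pvDot m ++ ['\n'])).flatten ++
        ((pvMid m ++ ['\n']) ++ ((List.replicate m (pvDot m ++ ['\n'])).flatten ++ pvDash m)))))) ++ ['\n'] := by
    rw [hdash]
    simp [List.append_assoc]
  rw [hL, pvStrip _ _ (by decide) ?hlast]
  case hlast =>
    intro x hx
    rw [← List.head?_reverse] at hx
    simp [List.reverse_append, hdash] at hx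
    subst hx
    rw [List.head?_replicate]
    split <;> decide
  · -- remaining main equality
    rw [pvFrame, pvJoinConsNeNil _ _ _ (by simp), pvJoinRepl, pvJoinConsNeNil _ _ _ (by simp),
      show List.replicate m (pvDot m) ++ [pvDash m] = List.replicate m (pvDot m) ++ pvDash m :: [] from rfl,
      pvJoinRepl, PySem.Chars.join_singleton]
    rw [hdash]
    simp [List.append_assoc]

theorem pv_main (num : Int) : make_a_window num = make_a_window_alt num := by
  set m := num.toNat with hm
  have hmax : max num 0 = (m : Int) := by omega
  have hrange : PySem.List.pyRange 0 num 1 = List.map (fun (k : Nat) => (k : Int)) (List.range m) := by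
    rcases le_or_gt 0 num with h | h
    · rw [show num = (m : Int) from by omega]
      exact PySem.List.pyRange_zero_natCast m
    · rw [show PySem.List.pyRange 0 num 1 = [] from by simp [PySem.List.pyRange]; omega,
        show m = 0 from by omega]
      simp
  rw [pv_hA num m hm hrange, pv_hB num m hmax, pv_final m]

-- ===== VERDICT (by name: the statement is the Claim_ definition above) =====
theorem make_a_window_spec : Claim_equal_make_a_window := by
  intro num _
  exact pv_main num
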